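-- pv_equiv track=rewrite | github.com/paulDDS/Projeto-IHS | ihs-project-layout-dev-grp-ohbf 2/exemples/python/app-pci.py | check_switches
-- ===== SOURCE A (Python) =====
-- def check_switches(switches_old, switchs_now):
--     # converte big end (logica de usuario final) pra little end (logica da programação)
--     switches = []
--     switches_that_changed = switches_old ^ switchs_now
--     #for i in range(18):
--     i=18
--     while(2**(i-1) > switches_that_changed):
--         i-= 1
--         if(i == 0): break
--     while(i>0):
--         if(2**(i-1) <= switches_that_changed):
--             switches_that_changed -= 2**(i-1)
--             switches.append((-i) + 19)
--         i-=1
--     return switches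
-- ===== SOURCE B (Python) =====
-- def check_switches(switches_old, switchs_now):
--     def collect(value, weight, pos):
--         if pos > 18:
--             return []
--         if value >= weight:
--             return [pos] + collect(value - weight, weight // 2, pos + 1)
--         return collect(value, weight // 2, pos + 1)
--     return collect(switches_old ^ switchs_now, 1 << 17, 1)
-- ===== Notes on version B (the rewrite author's own statement) =====
-- stated objective: simpler
-- what changed: replaces A's two while-loops (a preliminary MSB-finding loop with a break, then a greedy loop mutating an index and a remainder and appending (-i)+19) with one short guard-free recursive function that walks positions 1..18 while halving a weight, building the list front-to-back
import Mathlib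
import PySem

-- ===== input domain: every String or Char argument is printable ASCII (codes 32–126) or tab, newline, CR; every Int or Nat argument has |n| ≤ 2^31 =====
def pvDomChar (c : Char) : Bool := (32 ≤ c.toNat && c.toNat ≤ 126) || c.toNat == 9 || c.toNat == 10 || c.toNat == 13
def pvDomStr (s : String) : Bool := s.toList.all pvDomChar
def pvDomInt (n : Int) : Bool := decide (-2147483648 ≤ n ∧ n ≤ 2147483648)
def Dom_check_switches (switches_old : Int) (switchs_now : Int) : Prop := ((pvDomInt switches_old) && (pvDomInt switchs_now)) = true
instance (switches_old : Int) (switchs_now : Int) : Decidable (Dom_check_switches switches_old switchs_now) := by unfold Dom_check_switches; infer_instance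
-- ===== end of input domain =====

-- B replaces A's two while-loops (MSB search, then greedy subtraction on a mutated index and
-- remainder) with one short guard-free recursive descent over positions 1..18 (simpler).

-- ===== PORT A =====
-- first while loop: while 2**(i-1) > switches_that_changed: i -= 1; if i == 0: break
-- (i stays in 0..18 on every reachable call, so Nat fuel is exact)
def checkLoop1 : Nat → Int → Nat
  | 0, _ => 0
  | i+1, x =>
    if (2:Int)^i > x then
      if i = 0 then 0 else checkLoop1 i x
    else i+1

-- second while loop: greedy subtraction, appending (-i) + 19
def checkLoop2 : Nat → Int → List Int → List Int
  | 0, _, acc => acc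
  | i+1, x, acc =>
    if (2:Int)^i ≤ x then checkLoop2 i (x - 2^i) (acc ++ [(-((i:Int)+1)) + 19])
    else checkLoop2 i x acc

def check_switches (switches_old : Int) (switchs_now : Int) : List Int :=
  let x := PySem.Int.bxor switches_old switchs_now
  checkLoop2 (checkLoop1 18 x) x []

-- ===== PORT B =====
-- Source B's nested 'collect': recursion on pos, weight // 2 is Python floor division
def collectB (value : Int) (weight : Int) (pos : Int) : List Int :=
  if 18 < pos then []
  else if weight ≤ value then
    pos :: collectB (value - weight) (PySem.Int.floordiv weight 2) (pos + 1)
  else collectB value (PySem.Int.floordiv weight 2) (pos + 1)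
  termination_by (19 - pos).toNat
  decreasing_by all_goals (simp at *; omega)

def check_switches_alt (switches_old : Int) (switchs_now : Int) : List Int :=
  collectB (PySem.Int.bxor switches_old switchs_now) ((1:Int) <<< 17) 1

-- ===== PRECONDITION & SPEC =====
def Spec_check_switches (switches_old : Int) (switchs_now : Int) (out : List Int) : Prop := out = check_switches_alt switches_old switchs_now
instance (switches_old : Int) (switchs_now : Int) (out : List Int) : Decidable (Spec_check_switches switches_old switchs_now out) := by unfold Spec_check_switches; infer_instance

-- ===== CLAIM (what is proved, stated in full; the proofs are below) =====
def Claim_equal_check_switches : Prop := ∀ (switches_old : Int) (switchs_now : Int), Dom_check_switches switches_old switchs_now → Spec_check_switches switches_old switchs_now (check_switches switches_old switchs_now)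

-- ===== LEMMAS AND PROOFS =====

lemma loop1_neg (i : Nat) (x : Int) (hx : x < 0) : checkLoop1 i x = 0 := by
  induction i with
  | zero => rfl
  | succ i ih =>
    rw [checkLoop1]
    rw [if_pos (lt_of_lt_of_le hx (by positivity))]
    split
    · rfl
    · exact ih

lemma loop1_elim (i : Nat) (x : Int) (acc : List Int) (_hx : 0 ≤ x) :
    checkLoop2 (checkLoop1 i x) x acc = checkLoop2 i x acc := by
  induction i with
  | zero => rfl
  | succ i ih =>
    rw [checkLoop1]
    split
    · rename_i hgt
      split
      · rename_i h0
        subst h0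
        conv_rhs => rw [checkLoop2]
        rw [if_neg (by norm_num at hgt ⊢; omega)]
      · rw [ih]
        conv_rhs => rw [checkLoop2]
        rw [if_neg (by omega)]
    · rfl

lemma collectB_neg (f : Nat) (value weight pos : Int) (hf : 19 - pos ≤ (f:Int))
    (hv : value < 0) (hw : 0 ≤ weight) : collectB value weight pos = [] := by
  induction f generalizing weight pos with
  | zero => rw [collectB, if_pos (by omega)]
  | succ f ih =>
    rw [collectB]
    by_cases h18 : 18 < pos
    · rw [if_pos h18]
    · rw [if_neg h18, if_neg (by omega)]
      exact ih _ _ (by omega)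
        (by unfold PySem.Int.floordiv; exact Int.fdiv_nonneg hw (by norm_num))

lemma floordiv_two (a : Int) : PySem.Int.floordiv a 2 = a / 2 := by
  unfold PySem.Int.floordiv
  rw [Int.fdiv_eq_ediv]
  simp

lemma key (i : Nat) (hi : i ≤ 18) (x : Int) (acc : List Int) :
    checkLoop2 i x acc = acc ++ collectB x ((2:Int)^i / 2) (19 - (i:Int)) := by
  induction i generalizing x acc with
  | zero =>
    rw [checkLoop2, collectB, if_pos (by norm_num)]
    simp
  | succ i ih =>
    have h18 : ¬ ((18:Int) < 19 - (((i+1:Nat)):Int)) := by push_cast; omega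
    have hw : (2:Int)^(i+1) / 2 = 2^i := by
      rw [pow_succ, Int.mul_ediv_cancel _ (by norm_num)]
    have hpos : 19 - (((i:Nat):Int)+1) + 1 = 19 - ((i:Nat):Int) := by ring
    rw [checkLoop2]
    conv_rhs => rw [collectB]
    rw [hw, floordiv_two]
    by_cases h : (2:Int)^i ≤ x
    · rw [if_pos h, if_neg h18, if_pos h]
      rw [ih (by omega)]
      push_cast
      rw [hpos]
      have hval : (-(((i:Nat):Int)+1)) + 19 = 19 - (((i:Nat):Int)+1) := by ring
      rw [hval]
      simp [List.append_assoc]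
    · rw [if_neg h, if_neg h18, if_neg h]
      rw [ih (by omega)]
      push_cast
      rw [hpos]

lemma main_eq (x : Int) : checkLoop2 (checkLoop1 18 x) x [] = collectB x ((1:Int) <<< 17) 1 := by
  have hsh : ((1:Int) <<< 17) = (2:Int)^18 / 2 := by decide
  rw [hsh]
  by_cases hneg : x < 0
  · rw [loop1_neg 18 x hneg]
    rw [show checkLoop2 0 x [] = [] from rfl]
    exact (collectB_neg 19 x _ 1 (by norm_num) hneg (by norm_num)).symm
  · rw [loop1_elim 18 x [] (by omega)]
    have h := key 18 (by norm_num) x []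
    rw [h]
    norm_num

-- ===== VERDICT (by name: the statement is the Claim_ definition above) =====
theorem check_switches_spec : Claim_equal_check_switches := by
  intro o n _
  unfold Spec_check_switches check_switches check_switches_alt
  exact main_eq (PySem.Int.bxor o n)
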